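-- pv_equiv track=rewrite | github.com/delph123/programming-challenges | AdventOfCode/2023/day14.py | segments
-- ===== SOURCE A (Python) =====
-- def segments(map):
--     segs = []
--
--     for i in range(len(map)):
--         s = None
--         a = []
--         for j in range(len(map[i])):
--             if map[i][j] == "#":
--                 if s is not None:
--                     a.append((s, j))
--                     s = None
--             else:
--                 if s is None:
--                     s = j
--         if s is not None:
--             a.append((s, len(map[i])))
--         segs.append(a)
--
--     return segs
-- ===== SOURCE B (Python) =====
-- def segments(map):
--     result = []
--     for row in map:
--         bounds = [-1] + [j for j, c in enumerate(row) if c == "#"] + [len(row)]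
--         result.append([(p + 1, q) for p, q in zip(bounds, bounds[1:]) if q - p > 1])
--     return result
-- ===== Notes on version B (the rewrite author's own statement) =====
-- stated objective: alternative
-- what changed: Instead of scanning cells with a start-sentinel state machine, B first builds the list of '#' positions per row, pads it with the virtual boundaries -1 and len(row), and derives each segment from consecutive boundary pairs (p,q) with q-p>1 as (p+1,q).
import Mathlib
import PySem

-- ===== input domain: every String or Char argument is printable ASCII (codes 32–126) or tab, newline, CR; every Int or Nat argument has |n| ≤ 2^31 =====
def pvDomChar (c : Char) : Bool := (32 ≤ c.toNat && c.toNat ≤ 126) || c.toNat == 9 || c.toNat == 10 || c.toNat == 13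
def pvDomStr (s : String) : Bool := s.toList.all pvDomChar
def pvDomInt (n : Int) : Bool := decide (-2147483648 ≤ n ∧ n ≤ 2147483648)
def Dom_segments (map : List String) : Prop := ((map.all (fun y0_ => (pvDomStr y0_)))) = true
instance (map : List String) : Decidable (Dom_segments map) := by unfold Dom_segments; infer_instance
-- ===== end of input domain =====

-- B replaces A's per-cell start-sentinel state machine by a boundary-list derivation:
-- collect the '#' positions, pad with -1 and len(row), and read each segment off a
-- consecutive boundary pair (objective: alternative).

-- ===== PORT A =====
-- The inner loop's state: (s, a) — optional run start and collected segments;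
-- iterating j over the row's indices is ported as a foldl over zipIdx.
def pvStepA (st : Option Int × List (Int × Int)) (p : Char × Nat) : Option Int × List (Int × Int) :=
  if p.1 = '#' then
    match st.1 with
    | some sv => (none, st.2 ++ [(sv, (p.2 : Int))])
    | none => st
  else
    match st.1 with
    | none => (some (p.2 : Int), st.2)
    | some _ => st

def pvRowA (cs : List Char) : List (Int × Int) :=
  let st := (cs.zipIdx).foldl pvStepA (none, [])
  match st.1 with
  | some sv => st.2 ++ [(sv, (cs.length : Int))]
  | none => st.2

def segments (map : List String) : List (List (Int × Int)) :=
  map.map (fun row => pvRowA row.toList)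

-- ===== PORT B =====
-- Source B per row: bounds = [-1] + ['#' indices] + [len(row)], then the comprehension
-- over zip(bounds, bounds[1:]) keeping pairs with q - p > 1.
def pvRowB (cs : List Char) : List (Int × Int) :=
  let bounds : List Int :=
    (-1) :: ((cs.zipIdx.filter (fun p => p.1 = '#')).map (fun p => ((p.2 : Int)))) ++ [(cs.length : Int)]
  ((bounds.zip bounds.tail).filter (fun pq => pq.2 - pq.1 > 1)).map (fun pq => (pq.1 + 1, pq.2))

def segments_alt (map : List String) : List (List (Int × Int)) :=
  map.map (fun row => pvRowB row.toList)

-- ===== PRECONDITION & SPEC =====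
def Spec_segments (map : List String) (out : List (List (Int × Int))) : Prop := out = segments_alt map
instance (map : List String) (out : List (List (Int × Int))) : Decidable (Spec_segments map out) := by unfold Spec_segments; infer_instance

-- ===== CLAIM (what is proved, stated in full; the proofs are below) =====
def Claim_equal_segments : Prop := ∀ (map : List String), Dom_segments map → Spec_segments map (segments map)

-- ===== LEMMAS AND PROOFS =====

-- the '#'-index list of a suffix starting at absolute index k
def pvHash (cs : List Char) (k : Int) : List Int :=
  match cs with
  | [] => []
  | c :: rest => if c = '#' then k :: pvHash rest (k + 1) else pvHash rest (k + 1)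

-- the pairwise emission of Source B's comprehension, as a function of the bounds list
def pvEmit (bs : List Int) : List (Int × Int) :=
  ((bs.zip bs.tail).filter (fun pq => pq.2 - pq.1 > 1)).map (fun pq => (pq.1 + 1, pq.2))

theorem pvEmit_cons (p q : Int) (rest : List Int) :
    pvEmit (p :: q :: rest) =
      (if q - p > 1 then [(p + 1, q)] else []) ++ pvEmit (q :: rest) := by
  by_cases h : q - p > 1 <;> simp_all [pvEmit]

theorem pvHash_bridge (cs : List Char) (k : Nat) :
    pvHash cs (k : Int) = ((cs.zipIdx k).filter (fun p => p.1 = '#')).map (fun p => ((p.2 : Int))) := by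
  induction cs generalizing k with
  | nil => simp [pvHash]
  | cons c rest ih =>
    rw [List.zipIdx_cons, List.filter_cons]
    by_cases hc : c = '#'
    · have := ih (k + 1)
      push_cast at this
      simp [pvHash, hc, this]
    · have := ih (k + 1)
      push_cast at this
      simp [pvHash, hc, this]

theorem pvMain (cs : List Char) (k : Nat) (s : Option Int) (a : List (Int × Int))
    (hs : ∀ sv, s = some sv → sv < (k : Int)) :
    (match ((cs.zipIdx k).foldl pvStepA (s, a)).1 with
     | some sv => ((cs.zipIdx k).foldl pvStepA (s, a)).2 ++ [(sv, ((k + cs.length : Nat) : Int))]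
     | none => ((cs.zipIdx k).foldl pvStepA (s, a)).2)
    = a ++ pvEmit ((match s with | none => (k : Int) - 1 | some sv => sv - 1)
        :: pvHash cs (k : Int) ++ [((k + cs.length : Nat) : Int)]) := by
  induction cs generalizing k s a with
  | nil =>
    cases s with
    | none =>
      have h1 : ¬ ((k : Int) - ((k : Int) - 1) > 1) := by omega
      simp [pvHash, pvEmit]
    | some sv =>
      have hsv := hs sv rfl
      have h1 : (k : Int) - (sv - 1) > 1 := by omega
      simp [pvHash, pvEmit, h1]
  | cons c rest ih =>
    rw [List.zipIdx_cons, List.foldl_cons]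
    have hk1 : ((k + 1 : Nat) : Int) = (k : Int) + 1 := by push_cast; ring
    have hlen : k + (c :: rest).length = (k + 1) + rest.length := by simp; omega
    by_cases hc : c = '#'
    · subst hc
      cases s with
      | none =>
        rw [show pvStepA (none, a) ('#', k) = (none, a) from by simp [pvStepA], hlen,
          ih (k + 1) none a (by intro sv h; cases h)]
        have h1 : ¬ ((k : Int) - ((k : Int) - 1) > 1) := by omega
        have h2 : (k : Int) + 1 - 1 = (k : Int) := by ring
        simp [pvHash, List.cons_append, pvEmit_cons, hk1, h2]
      | some sv =>
        have hsv := hs sv rfl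
        rw [show pvStepA (some sv, a) ('#', k) = (none, a ++ [(sv, (k : Int))]) from by
            simp [pvStepA], hlen,
          ih (k + 1) none (a ++ [(sv, (k : Int))]) (by intro sv' h; cases h)]
        have h1 : (k : Int) - (sv - 1) > 1 := by omega
        have h2 : (k : Int) + 1 - 1 = (k : Int) := by ring
        simp [pvHash, List.cons_append, pvEmit_cons, h1, hk1, h2]
    · cases s with
      | none =>
        rw [show pvStepA (none, a) (c, k) = (some (k : Int), a) from by simp [pvStepA, hc], hlen,
          ih (k + 1) (some (k : Int)) a (by intro sv h; cases h; omega)]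
        simp [pvHash, hc, hk1]
      | some sv =>
        have hsv := hs sv rfl
        rw [show pvStepA (some sv, a) (c, k) = (some sv, a) from by simp [pvStepA, hc], hlen,
          ih (k + 1) (some sv) a (by intro sv' h; cases h; omega)]
        simp [pvHash, hc, hk1]

theorem pvRow_eq (cs : List Char) : pvRowA cs = pvRowB cs := by
  have := pvMain cs 0 none []
  simp only [Nat.cast_zero, List.nil_append, Nat.zero_add] at this
  have h := this (by intro sv h; cases h)
  have hb := pvHash_bridge cs 0
  rw [Nat.cast_zero] at hb
  rw [hb] at h
  simpa [pvRowA, pvRowB, pvEmit] using h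

-- ===== VERDICT (by name: the statement is the Claim_ definition above) =====
theorem segments_spec : Claim_equal_segments := by
  intro map _
  unfold Spec_segments segments segments_alt
  exact List.map_congr_left (fun row _ => pvRow_eq row.toList)
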